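-- pv_equiv track=rewrite | github.com/Hexlet/hexlet-friends | contributors/utils/misc.py | get_rotated_sums_for_contrib
-- ===== SOURCE A (Python) =====
-- from collections import deque
--
-- NUM_OF_MONTHS_IN_A_YEAR = 12
--
-- def get_rotated_sums_for_contrib(
--     current_month: int,
--     sums_of_contribs_by_months,
--     contrib_type,
-- ):
--     """
--     Return an array of 12 sums of contributions of the given type.
--
--     Each position corresponds to a month.
--     The collection is left-shifted by the numeric value of the current month.
--     """
--     months = range(1, NUM_OF_MONTHS_IN_A_YEAR + 1)
--     array = deque(
--         [
--             sums_of_contribs_by_months.get(month, {}).get(contrib_type, 0)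
--             for month in months
--         ]
--     )
--     array.rotate(-current_month)
--     return list(array)
-- ===== SOURCE B (Python) =====
-- NUM_OF_MONTHS_IN_A_YEAR = 12
--
-- def get_rotated_sums_for_contrib(
--     current_month: int,
--     sums_of_contribs_by_months,
--     contrib_type,
-- ):
--     """Single indexed pass: no deque, no separate rotate phase."""
--     return [
--         sums_of_contribs_by_months.get(
--             (i + current_month) % NUM_OF_MONTHS_IN_A_YEAR + 1, {},
--         ).get(contrib_type, 0)
--         for i in range(NUM_OF_MONTHS_IN_A_YEAR)
--     ]
-- ===== Notes on version B (the rewrite author's own statement) =====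
-- stated objective: simpler
-- what changed: Drops the deque build-then-rotate: B computes the rotated result directly in one indexed comprehension, mapping output position i to source month (i + current_month) % 12 + 1.
import Mathlib
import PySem

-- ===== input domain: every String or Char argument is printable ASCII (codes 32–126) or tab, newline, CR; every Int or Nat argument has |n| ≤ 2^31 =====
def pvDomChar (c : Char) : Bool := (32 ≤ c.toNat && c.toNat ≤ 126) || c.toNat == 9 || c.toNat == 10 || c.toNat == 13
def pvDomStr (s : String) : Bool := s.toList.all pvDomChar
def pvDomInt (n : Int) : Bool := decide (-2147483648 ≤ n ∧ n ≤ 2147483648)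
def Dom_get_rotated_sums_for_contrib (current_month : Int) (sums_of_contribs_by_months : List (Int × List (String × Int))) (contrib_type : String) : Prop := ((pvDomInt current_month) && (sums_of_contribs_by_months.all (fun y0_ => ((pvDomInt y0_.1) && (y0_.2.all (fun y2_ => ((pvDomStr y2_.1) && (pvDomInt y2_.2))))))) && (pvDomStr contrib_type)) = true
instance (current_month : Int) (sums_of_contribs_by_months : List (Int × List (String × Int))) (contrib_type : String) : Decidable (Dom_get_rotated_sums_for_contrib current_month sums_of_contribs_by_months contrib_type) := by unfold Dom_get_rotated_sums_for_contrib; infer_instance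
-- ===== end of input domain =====

-- B fuses A's build-then-rotate (deque) two phases into one indexed pass over range(12): simpler, no deque.

-- ===== PORT A =====
-- build the 12 per-month sums in month order, then rotate left by current_month (deque.rotate(-c) = left rotation by c mod 12)
def get_rotated_sums_for_contrib (current_month : Int) (sums_of_contribs_by_months : List (Int × List (String × Int))) (contrib_type : String) : List Int :=
  let d := PySem.Dict.ofList sums_of_contribs_by_months
  let months := PySem.List.pyRange 1 (12 + 1) 1
  let array := months.map (fun month => (PySem.Dict.ofList (d.getD month [])).getD contrib_type 0)
  -- deque.rotate(-current_month) on a length-12 deque: left rotation by current_month mod 12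
  let k := (PySem.Int.mod current_month 12).toNat
  array.drop k ++ array.take k

-- ===== PORT B =====
def get_rotated_sums_for_contrib_alt (current_month : Int) (sums_of_contribs_by_months : List (Int × List (String × Int))) (contrib_type : String) : List Int :=
  (PySem.List.pyRange 0 12 1).map (fun i =>
    (PySem.Dict.ofList ((PySem.Dict.ofList sums_of_contribs_by_months).getD (PySem.Int.mod (i + current_month) 12 + 1) [])).getD contrib_type 0)

-- ===== PRECONDITION & SPEC =====
def Spec_get_rotated_sums_for_contrib (current_month : Int) (sums_of_contribs_by_months : List (Int × List (String × Int))) (contrib_type : String) (out : List Int) : Prop := out = get_rotated_sums_for_contrib_alt current_month sums_of_contribs_by_months contrib_type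
instance (current_month : Int) (sums_of_contribs_by_months : List (Int × List (String × Int))) (contrib_type : String) (out : List Int) : Decidable (Spec_get_rotated_sums_for_contrib current_month sums_of_contribs_by_months contrib_type out) := by unfold Spec_get_rotated_sums_for_contrib; infer_instance

-- ===== CLAIM (what is proved, stated in full; the proofs are below) =====
def Claim_equal_get_rotated_sums_for_contrib : Prop := ∀ (current_month : Int) (sums_of_contribs_by_months : List (Int × List (String × Int))) (contrib_type : String), Dom_get_rotated_sums_for_contrib current_month sums_of_contribs_by_months contrib_type → Spec_get_rotated_sums_for_contrib current_month sums_of_contribs_by_months contrib_type (get_rotated_sums_for_contrib current_month sums_of_contribs_by_months contrib_type)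

-- ===== LEMMAS AND PROOFS =====

-- the generic rotation identity: one indexed pass over range(12) equals build-then-rotate
theorem rot_eq (f : Int → Int) (c : Int) :
    ((PySem.List.pyRange 1 (12 + 1) 1).map f).drop (PySem.Int.mod c 12).toNat
      ++ ((PySem.List.pyRange 1 (12 + 1) 1).map f).take (PySem.Int.mod c 12).toNat
    = (PySem.List.pyRange 0 12 1).map (fun i => f (PySem.Int.mod (i + c) 12 + 1)) := by
  have hmod : PySem.Int.mod c 12 = c % 12 := PySem.Int.mod_eq_emod_of_pos (by norm_num)
  have hk0 : 0 ≤ c % 12 := Int.emod_nonneg c (by norm_num)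
  have hk12 : c % 12 < 12 := Int.emod_lt_of_pos c (by norm_num)
  set k : Nat := (c % 12).toNat with hkdef
  have hk : (k : Int) = c % 12 := Int.toNat_of_nonneg hk0
  have hklt : k < 12 := by omega
  rw [hmod]
  apply List.ext_getElem
  · simp [PySem.List.length_pyRange_one]; omega
  · intro j h1 h2
    have hj : j < 12 := by
      simpa [PySem.List.length_pyRange_one] using h2
    rcases Nat.lt_or_ge j (12 - k) with hcase | hcase
    · rw [List.getElem_append_left (by simp [PySem.List.length_pyRange_one]; omega)]
      rw [List.getElem_drop, List.getElem_map, List.getElem_map,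
          PySem.List.getElem_pyRange_one, PySem.List.getElem_pyRange_one]
      have hmod2 : PySem.Int.mod ((0 + (j:Int)) + c) 12 = ((j:Int) + c) % 12 := by
        rw [PySem.Int.mod_eq_emod_of_pos (show (0:Int) < 12 by norm_num)]; ring_nf
      rw [hmod2]
      congr 1
      omega
    · rw [List.getElem_append_right (by simp [PySem.List.length_pyRange_one]; omega)]
      rw [List.getElem_take, List.getElem_map, List.getElem_map,
          PySem.List.getElem_pyRange_one, PySem.List.getElem_pyRange_one]
      have hmod2 : PySem.Int.mod ((0 + (j:Int)) + c) 12 = ((j:Int) + c) % 12 := by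
        rw [PySem.Int.mod_eq_emod_of_pos (show (0:Int) < 12 by norm_num)]; ring_nf
      rw [hmod2]
      congr 1
      have hlen : (((PySem.List.pyRange 1 (12+1) 1).map f).drop k).length = 12 - k := by
        simp [PySem.List.length_pyRange_one]
      rw [hlen]
      omega

-- ===== VERDICT (by name: the statement is the Claim_ definition above) =====
theorem get_rotated_sums_for_contrib_spec : Claim_equal_get_rotated_sums_for_contrib := by
  intro c sums t _
  unfold Spec_get_rotated_sums_for_contrib get_rotated_sums_for_contrib get_rotated_sums_for_contrib_alt
  exact rot_eq _ c
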